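-- pv_equiv track=rewrite | github.com/issdandavis/SCBE-AETHERMOORE | tests/test_neurogolf_family_corridor.py | _tile_self_complement_output
-- ===== SOURCE A (Python) =====
-- def _complement(grid: list[list[int]], color: int) -> list[list[int]]:
--     """Boolean complement: 0→color, color→0."""
--     return [[0 if v != 0 else color for v in row] for row in grid]
--
-- def _tile_self_complement_output(inp: list[list[int]], color: int) -> list[list[int]]:
--     """Compute expected tile_self_complement output."""
--     ih = len(inp)
--     iw = len(inp[0]) if ih > 0 else 0
--     comp = _complement(inp, color)
--     out = [[0] * (iw * iw) for _ in range(ih * ih)]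
--     for r in range(ih):
--         for c in range(iw):
--             if inp[r][c] != 0:
--                 for br in range(ih):
--                     for bc in range(iw):
--                         out[r * ih + br][c * iw + bc] = comp[br][bc]
--     return out
-- ===== SOURCE B (Python) =====
-- def _complement(grid, color):
--     return [[0 if v != 0 else color for v in row] for row in grid]
--
-- def _tile_self_complement_output(inp, color):
--     ih = len(inp)
--     iw = len(inp[0]) if ih > 0 else 0
--     comp = _complement(inp, color)
--     chunks = [row[:iw] for row in comp]
--     zeros = [0] * iw
--     return [[x for c in inp[i // ih][:iw] for x in (chunks[i % ih] if c != 0 else zeros)]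
--             for i in range(ih * ih)]
-- ===== Notes on version B (the rewrite author's own statement) =====
-- stated objective: faster
-- what changed: Replaces A's scatter (pre-zeroed ih^2 x iw^2 buffer mutated by pasting complement blocks from each nonzero input cell) with a gather: each output row is built directly by flattening, per input-row cell, either the matching complement-row chunk or a shared zero chunk, removing all per-cell index arithmetic and buffer mutation.
import Mathlib
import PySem

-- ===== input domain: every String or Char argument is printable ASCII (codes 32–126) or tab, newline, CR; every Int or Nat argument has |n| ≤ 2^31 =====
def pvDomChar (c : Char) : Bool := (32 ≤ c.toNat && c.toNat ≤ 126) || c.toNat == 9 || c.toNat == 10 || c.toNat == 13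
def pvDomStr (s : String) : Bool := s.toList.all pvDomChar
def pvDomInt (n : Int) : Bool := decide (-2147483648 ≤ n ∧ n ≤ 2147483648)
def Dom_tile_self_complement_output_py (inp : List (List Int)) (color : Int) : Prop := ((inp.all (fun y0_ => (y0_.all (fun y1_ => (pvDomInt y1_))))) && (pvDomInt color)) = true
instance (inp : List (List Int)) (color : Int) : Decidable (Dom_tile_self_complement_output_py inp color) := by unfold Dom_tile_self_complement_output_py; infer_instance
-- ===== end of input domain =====

-- B rewrites A's scatter (pre-zeroed buffer mutated by pasting complement blocks from each
-- nonzero input cell) as a gather: each output row is built directly by flattening one chunk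
-- (complement row or zeros) per input cell; measurably faster by constant factor (objective: faster).

-- ===== PORT A =====
-- _complement, shared helper of both Pythons
def pvComplement (grid : List (List Int)) (color : Int) : List (List Int) :=
  grid.map (fun row => row.map (fun v => if v ≠ 0 then 0 else color))

-- out[i][j] = v  (Python list assignment; indices are in range wherever A uses it)
def pvSet (out : List (List Int)) (i j : Nat) (v : Int) : List (List Int) :=
  out.modify i (fun row => row.set j v)

-- inp[r][c] is ported as getD with default 0; Pre_ excludes the inputs where Python raises,
-- and wherever A returns the indices are in range, so the default is never the result.
def tile_self_complement_output_py (inp : List (List Int)) (color : Int) : List (List Int) :=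
  let ih := inp.length
  let iw := if 0 < inp.length then (inp.getD 0 []).length else 0
  let comp := pvComplement inp color
  let out0 := (List.range (ih * ih)).map (fun _ => List.replicate (iw * iw) (0 : Int))
  (List.range ih).foldl (fun out r =>
    (List.range iw).foldl (fun out c =>
      if (inp.getD r []).getD c 0 ≠ 0 then
        (List.range ih).foldl (fun out br =>
          (List.range iw).foldl (fun out bc =>
            pvSet out (r * ih + br) (c * iw + bc) ((comp.getD br []).getD bc 0)) out) out
      else out) out) out0

-- ===== PORT B =====
-- row[:iw] with iw ≥ 0 is exactly List.take; '[x for c in L for x in M]' is List.flatMap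
def tile_self_complement_output_py_alt (inp : List (List Int)) (color : Int) : List (List Int) :=
  let ih := inp.length
  let iw := if 0 < inp.length then (inp.getD 0 []).length else 0
  let comp := pvComplement inp color
  let chunks := comp.map (fun row => row.take iw)
  let zeros := List.replicate iw (0 : Int)
  (List.range (ih * ih)).map (fun i =>
    ((inp.getD (i / ih) []).take iw).flatMap (fun c =>
      if c ≠ 0 then chunks.getD (i % ih) [] else zeros))

-- ===== PRECONDITION & SPEC =====
-- Pre_ excludes exactly the inputs on which the Python A raises IndexError:
-- grids with some row strictly shorter than the first row (inp[r][c] with c < len(inp[0])).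
def Pre_tile_self_complement_output_py (inp : List (List Int)) (color : Int) : Prop :=
  ∀ row ∈ inp, (inp.getD 0 []).length ≤ row.length
instance (inp : List (List Int)) (color : Int) : Decidable (Pre_tile_self_complement_output_py inp color) := by unfold Pre_tile_self_complement_output_py; infer_instance

def pvWitness_tile_self_complement_output_py : List (List Int) × Int := ([[1, 0], [0, 2]], 5)

def Spec_tile_self_complement_output_py (inp : List (List Int)) (color : Int) (out : List (List Int)) : Prop := out = tile_self_complement_output_py_alt inp color
instance (inp : List (List Int)) (color : Int) (out : List (List Int)) : Decidable (Spec_tile_self_complement_output_py inp color out) := by unfold Spec_tile_self_complement_output_py; infer_instance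

-- ===== CLAIM (what is proved, stated in full; the proofs are below) =====
def Claim_equal_tile_self_complement_output_py : Prop := ∀ (inp : List (List Int)) (color : Int), Dom_tile_self_complement_output_py inp color → Pre_tile_self_complement_output_py inp color → Spec_tile_self_complement_output_py inp color (tile_self_complement_output_py inp color)


-- ===== LEMMAS AND PROOFS =====

-- cell (k,l) of a grid, with Python's 0 default off the grid
def gCell (o : List (List Int)) (k l : Nat) : Int := (o.getD k []).getD l 0

-- the two derived quantities both ports start from
def iwOf (inp : List (List Int)) : Nat := if 0 < inp.length then (inp.getD 0 []).length else 0
def gvOf (inp : List (List Int)) (color : Int) : Nat → Nat → Int :=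
  fun br bc => ((pvComplement inp color).getD br []).getD bc 0

-- A's loops, named innermost-out so each can be characterized by induction
def pasteRow (o : List (List Int)) (ρ κ : Nat) (g : Nat → Int) (n : Nat) : List (List Int) :=
  (List.range n).foldl (fun o bc => pvSet o ρ (κ + bc) (g bc)) o

def pasteBlock (o : List (List Int)) (ρ₀ κ : Nat) (gv : Nat → Nat → Int) (m n : Nat) : List (List Int) :=
  (List.range m).foldl (fun o br => pasteRow o (ρ₀ + br) κ (gv br) n) o

def cLoop (o : List (List Int)) (ρ₀ m n : Nat) (row : List Int) (gv : Nat → Nat → Int) (w : Nat) : List (List Int) :=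
  (List.range w).foldl (fun o c => if row.getD c 0 ≠ 0 then pasteBlock o ρ₀ (c * n) gv m n else o) o

def rLoop (o : List (List Int)) (inp : List (List Int)) (ih iw : Nat) (gv : Nat → Nat → Int) (t : Nat) : List (List Int) :=
  (List.range t).foldl (fun o r => cLoop o (r * ih) ih iw (inp.getD r []) gv iw) o

lemma length_pvSet (o : List (List Int)) (i j : Nat) (v : Int) : (pvSet o i j v).length = o.length := by
  simp [pvSet]

lemma getD_pvSet (o : List (List Int)) (i j k : Nat) (v : Int) :
    (pvSet o i j v).getD k [] = if k = i then (o.getD k []).set j v else o.getD k [] := by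
  unfold pvSet
  by_cases h : i = k
  · subst h
    simp only [List.getD_eq_getElem?_getD, List.getElem?_modify, if_pos rfl]
    cases o[i]? <;> simp
  · simp [List.getD_eq_getElem?_getD, List.getElem?_modify, h, Ne.symm h]

lemma rowlen_pvSet (o : List (List Int)) (i j k : Nat) (v : Int) :
    ((pvSet o i j v).getD k []).length = (o.getD k []).length := by
  rw [getD_pvSet]; split <;> simp

lemma gCell_pvSet (o : List (List Int)) (i j : Nat) (v : Int) (k l : Nat)
    (hj : j < (o.getD i []).length) :
    gCell (pvSet o i j v) k l = if k = i ∧ l = j then v else gCell o k l := by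
  unfold gCell
  rw [getD_pvSet]
  by_cases hk : k = i
  · subst hk
    rw [if_pos rfl]
    by_cases hl : l = j
    · subst hl
      rw [if_pos ⟨rfl, rfl⟩, List.getD_eq_getElem _ _ (by simpa using hj),
        List.getElem_set_self]
    · rw [if_neg (by tauto)]
      simp [List.getD_eq_getElem?_getD, List.getElem?_set,
        show j ≠ l from fun h => hl h.symm]
  · rw [if_neg hk, if_neg (by tauto)]

lemma pasteRow_succ (o : List (List Int)) (ρ κ : Nat) (g : Nat → Int) (n : Nat) :
    pasteRow o ρ κ g (n + 1) = pvSet (pasteRow o ρ κ g n) ρ (κ + n) (g n) := by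
  simp [pasteRow, List.range_succ]

lemma length_pasteRow (o : List (List Int)) (ρ κ : Nat) (g : Nat → Int) (n : Nat) :
    (pasteRow o ρ κ g n).length = o.length := by
  induction n with
  | zero => rfl
  | succ n ih => rw [pasteRow_succ, length_pvSet, ih]

lemma rowlen_pasteRow (o : List (List Int)) (ρ κ : Nat) (g : Nat → Int) (n k : Nat) :
    ((pasteRow o ρ κ g n).getD k []).length = (o.getD k []).length := by
  induction n with
  | zero => rfl
  | succ n ih => rw [pasteRow_succ, rowlen_pvSet, ih]

lemma gCell_pasteRow (o : List (List Int)) (ρ κ : Nat) (g : Nat → Int) (n : Nat) (k l : Nat)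
    (hκ : κ + n ≤ (o.getD ρ []).length) :
    gCell (pasteRow o ρ κ g n) k l
      = if k = ρ ∧ κ ≤ l ∧ l < κ + n then g (l - κ) else gCell o k l := by
  induction n with
  | zero =>
    rw [show pasteRow o ρ κ g 0 = o from rfl, if_neg (by omega)]
  | succ n ih =>
    rw [pasteRow_succ, gCell_pvSet _ _ _ _ _ _ (by rw [rowlen_pasteRow]; omega),
        ih (by omega)]
    by_cases h1 : k = ρ ∧ l = κ + n
    · have hl : l - κ = n := by omega
      rw [if_pos h1, if_pos (show k = ρ ∧ κ ≤ l ∧ l < κ + (n + 1) from ⟨h1.1, by omega, by omega⟩), hl]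
    · by_cases h2 : k = ρ ∧ κ ≤ l ∧ l < κ + n
      · rw [if_neg h1, if_pos h2,
          if_pos (show k = ρ ∧ κ ≤ l ∧ l < κ + (n + 1) from ⟨h2.1, h2.2.1, by omega⟩)]
      · rw [if_neg h1, if_neg h2,
          if_neg (show ¬ (k = ρ ∧ κ ≤ l ∧ l < κ + (n + 1)) from by omega)]

lemma pasteBlock_succ (o : List (List Int)) (ρ₀ κ : Nat) (gv : Nat → Nat → Int) (m n : Nat) :
    pasteBlock o ρ₀ κ gv (m + 1) n = pasteRow (pasteBlock o ρ₀ κ gv m n) (ρ₀ + m) κ (gv m) n := by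
  simp [pasteBlock, List.range_succ]

lemma length_pasteBlock (o : List (List Int)) (ρ₀ κ : Nat) (gv : Nat → Nat → Int) (m n : Nat) :
    (pasteBlock o ρ₀ κ gv m n).length = o.length := by
  induction m with
  | zero => rfl
  | succ m ih => rw [pasteBlock_succ, length_pasteRow, ih]

lemma rowlen_pasteBlock (o : List (List Int)) (ρ₀ κ : Nat) (gv : Nat → Nat → Int) (m n k : Nat) :
    ((pasteBlock o ρ₀ κ gv m n).getD k []).length = (o.getD k []).length := by
  induction m with
  | zero => rfl
  | succ m ih => rw [pasteBlock_succ, rowlen_pasteRow, ih]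

lemma gCell_pasteBlock (o : List (List Int)) (ρ₀ κ : Nat) (gv : Nat → Nat → Int) (m n : Nat)
    (k l : Nat) (hm : ρ₀ + m ≤ o.length)
    (hκ : ∀ k', k' < o.length → κ + n ≤ ((o.getD k' []).length)) :
    gCell (pasteBlock o ρ₀ κ gv m n) k l
      = if ρ₀ ≤ k ∧ k < ρ₀ + m ∧ κ ≤ l ∧ l < κ + n then gv (k - ρ₀) (l - κ) else gCell o k l := by
  induction m with
  | zero =>
    rw [show pasteBlock o ρ₀ κ gv 0 n = o from rfl, if_neg (by omega)]
  | succ m ih =>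
    rw [pasteBlock_succ,
      gCell_pasteRow _ _ _ _ _ _ _ (by rw [rowlen_pasteBlock]; exact hκ _ (by omega)),
      ih (by omega)]
    by_cases h1 : k = ρ₀ + m ∧ κ ≤ l ∧ l < κ + n
    · have hk : k - ρ₀ = m := by omega
      rw [if_pos h1,
        if_pos (show ρ₀ ≤ k ∧ k < ρ₀ + (m + 1) ∧ κ ≤ l ∧ l < κ + n from
          ⟨by omega, by omega, h1.2.1, h1.2.2⟩), hk]
    · by_cases h2 : ρ₀ ≤ k ∧ k < ρ₀ + m ∧ κ ≤ l ∧ l < κ + n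
      · rw [if_neg h1, if_pos h2,
          if_pos (show ρ₀ ≤ k ∧ k < ρ₀ + (m + 1) ∧ κ ≤ l ∧ l < κ + n from
            ⟨h2.1, by omega, h2.2.2.1, h2.2.2.2⟩)]
      · rw [if_neg h1, if_neg h2,
          if_neg (show ¬ (ρ₀ ≤ k ∧ k < ρ₀ + (m + 1) ∧ κ ≤ l ∧ l < κ + n) from by omega)]

lemma cLoop_succ (o : List (List Int)) (ρ₀ m n : Nat) (row : List Int) (gv : Nat → Nat → Int) (w : Nat) :
    cLoop o ρ₀ m n row gv (w + 1)
      = (if row.getD w 0 ≠ 0 then pasteBlock (cLoop o ρ₀ m n row gv w) ρ₀ (w * n) gv m n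
         else cLoop o ρ₀ m n row gv w) := by
  simp [cLoop, List.range_succ]

lemma length_cLoop (o : List (List Int)) (ρ₀ m n : Nat) (row : List Int) (gv : Nat → Nat → Int) (w : Nat) :
    (cLoop o ρ₀ m n row gv w).length = o.length := by
  induction w with
  | zero => rfl
  | succ w ihw =>
    rw [cLoop_succ]; split
    · rw [length_pasteBlock, ihw]
    · exact ihw

lemma rowlen_cLoop (o : List (List Int)) (ρ₀ m n : Nat) (row : List Int) (gv : Nat → Nat → Int) (w k : Nat) :
    ((cLoop o ρ₀ m n row gv w).getD k []).length = (o.getD k []).length := by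
  induction w with
  | zero => rfl
  | succ w ihw =>
    rw [cLoop_succ]; split
    · rw [rowlen_pasteBlock, ihw]
    · exact ihw

-- l sits in the w-th width-n band: its divmod by n
lemma band_div (w n l : Nat) (h1 : w * n ≤ l) (h2 : l < w * n + n) : l / n = w ∧ l % n = l - w * n := by
  have hn : 0 < n := by omega
  rw [Nat.mul_comm w n] at h1 h2
  obtain ⟨b, hb, rfl⟩ : ∃ b, b < n ∧ l = n * w + b := ⟨l - n * w, by omega, by omega⟩
  refine ⟨?_, ?_⟩
  · rw [Nat.mul_add_div hn, Nat.div_eq_of_lt hb, Nat.add_zero]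
  · rw [Nat.mul_add_mod, Nat.mod_eq_of_lt hb, Nat.mul_comm n w]; omega

lemma gCell_cLoop (o : List (List Int)) (ρ₀ m n : Nat) (row : List Int) (gv : Nat → Nat → Int)
    (w : Nat) (k l : Nat)
    (hm : ρ₀ + m ≤ o.length)
    (hr : ∀ k', k' < o.length → w * n ≤ (o.getD k' []).length)
    (h0 : ∀ k' l', ρ₀ ≤ k' → k' < ρ₀ + m → gCell o k' l' = 0) :
    gCell (cLoop o ρ₀ m n row gv w) k l
      = if ρ₀ ≤ k ∧ k < ρ₀ + m ∧ l < w * n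
        then (if row.getD (l / n) 0 ≠ 0 then gv (k - ρ₀) (l % n) else 0)
        else gCell o k l := by
  induction w with
  | zero =>
    rw [show cLoop o ρ₀ m n row gv 0 = o from rfl, if_neg (by omega)]
  | succ w ih =>
    have hs : (w + 1) * n = w * n + n := by ring
    have hr' : ∀ k', k' < o.length → w * n ≤ (o.getD k' []).length :=
      fun k' hk' => le_trans (by omega) (hr k' hk')
    rw [cLoop_succ]
    by_cases hc : row.getD w 0 ≠ 0
    · rw [if_pos hc,
        gCell_pasteBlock _ _ _ _ _ _ _ _ (by rw [length_cLoop]; exact hm)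
          (fun k' hk' => by
            rw [rowlen_cLoop]
            rw [length_cLoop] at hk'
            have := hr k' hk'; omega),
        ih hr']
      by_cases h1 : ρ₀ ≤ k ∧ k < ρ₀ + m ∧ w * n ≤ l ∧ l < w * n + n
      · obtain ⟨hd, hmod⟩ := band_div w n l h1.2.2.1 h1.2.2.2
        rw [if_pos h1,
          if_pos (show ρ₀ ≤ k ∧ k < ρ₀ + m ∧ l < (w + 1) * n from by omega), hd, hmod,
          if_pos hc]
      · by_cases h2 : ρ₀ ≤ k ∧ k < ρ₀ + m ∧ l < w * n
        · rw [if_neg h1, if_pos h2,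
            if_pos (show ρ₀ ≤ k ∧ k < ρ₀ + m ∧ l < (w + 1) * n from by omega)]
        · rw [if_neg h1, if_neg h2,
            if_neg (show ¬ (ρ₀ ≤ k ∧ k < ρ₀ + m ∧ l < (w + 1) * n) from by omega)]
    · rw [if_neg hc, ih hr']
      by_cases h2 : ρ₀ ≤ k ∧ k < ρ₀ + m ∧ l < w * n
      · rw [if_pos h2,
          if_pos (show ρ₀ ≤ k ∧ k < ρ₀ + m ∧ l < (w + 1) * n from by omega)]
      · by_cases h1 : ρ₀ ≤ k ∧ k < ρ₀ + m ∧ l < (w + 1) * n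
        · obtain ⟨hd, _⟩ := band_div w n l (by omega) (by omega)
          rw [if_neg h2, if_pos h1, hd, if_neg (show ¬ row.getD w 0 ≠ 0 from hc),
            h0 k l h1.1 h1.2.1]
        · rw [if_neg h2, if_neg h1]

lemma rLoop_succ (o inp : List (List Int)) (ih iw : Nat) (gv : Nat → Nat → Int) (t : Nat) :
    rLoop o inp ih iw gv (t + 1)
      = cLoop (rLoop o inp ih iw gv t) (t * ih) ih iw (inp.getD t []) gv iw := by
  simp [rLoop, List.range_succ]

lemma length_rLoop (o inp : List (List Int)) (ih iw : Nat) (gv : Nat → Nat → Int) (t : Nat) :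
    (rLoop o inp ih iw gv t).length = o.length := by
  induction t with
  | zero => rfl
  | succ t iht => rw [rLoop_succ, length_cLoop, iht]

lemma rowlen_rLoop (o inp : List (List Int)) (ih iw : Nat) (gv : Nat → Nat → Int) (t k : Nat) :
    ((rLoop o inp ih iw gv t).getD k []).length = (o.getD k []).length := by
  induction t with
  | zero => rfl
  | succ t iht => rw [rLoop_succ, rowlen_cLoop, iht]

-- the gather formula B computes at cell (k, l)
def gForm (inp : List (List Int)) (ih iw : Nat) (gv : Nat → Nat → Int) (k l : Nat) : Int :=
  if (inp.getD (k / ih) []).getD (l / iw) 0 ≠ 0 then gv (k % ih) (l % iw) else 0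

lemma gCell_rLoop (o inp : List (List Int)) (ih iw : Nat) (gv : Nat → Nat → Int) (t : Nat)
    (hlen0 : o.length = ih * ih)
    (hrow : ∀ k', (o.getD k' []).length = if k' < ih * ih then iw * iw else 0)
    (h0 : ∀ k' l', gCell o k' l' = 0) :
    t ≤ ih → ∀ k l, gCell (rLoop o inp ih iw gv t) k l
      = if k < t * ih ∧ l < iw * iw then gForm inp ih iw gv k l else 0 := by
  induction t with
  | zero =>
    intro _ k l
    rw [show rLoop o inp ih iw gv 0 = o from rfl, if_neg (by omega), h0]
  | succ t iht =>
    intro ht k l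
    have hs : (t + 1) * ih = t * ih + ih := by ring
    have hmul : (t + 1) * ih ≤ ih * ih := Nat.mul_le_mul_right ih ht
    have iht' := iht (by omega)
    rw [rLoop_succ, gCell_cLoop _ _ _ _ _ _ _ _ _
      (by rw [length_rLoop, hlen0]; omega)
      (fun k' hk' => by
        rw [length_rLoop, hlen0] at hk'
        rw [rowlen_rLoop, hrow k', if_pos hk'])
      (fun k' l' hb1 hb2 => by
        rw [iht' k' l', if_neg (show ¬ (k' < t * ih ∧ l' < iw * iw) from by omega)])]
    by_cases h1 : t * ih ≤ k ∧ k < t * ih + ih ∧ l < iw * iw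
    · obtain ⟨hd, hmod⟩ := band_div t ih k h1.1 h1.2.1
      rw [if_pos (show t * ih ≤ k ∧ k < t * ih + ih ∧ l < iw * iw from h1),
        if_pos (show k < (t + 1) * ih ∧ l < iw * iw from by constructor <;> omega)]
      unfold gForm
      rw [hd, hmod]
    · rw [if_neg (show ¬ (t * ih ≤ k ∧ k < t * ih + ih ∧ l < iw * iw) from h1), iht' k l]
      by_cases h2 : k < t * ih ∧ l < iw * iw
      · rw [if_pos h2, if_pos (show k < (t + 1) * ih ∧ l < iw * iw from ⟨by omega, h2.2⟩)]
      · rw [if_neg h2, if_neg (show ¬ (k < (t + 1) * ih ∧ l < iw * iw) from by omega)]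

-- the two ports, rephrased (both equalities are definitional)
lemma portA_eq_rLoop (inp : List (List Int)) (color : Int) :
    tile_self_complement_output_py inp color
      = rLoop ((List.range (inp.length * inp.length)).map
                (fun _ => List.replicate (iwOf inp * iwOf inp) (0 : Int)))
          inp inp.length (iwOf inp) (gvOf inp color) inp.length := rfl

-- a list equals the table of its own entries
lemma self_eq_range_map (l : List Int) :
    (List.range l.length).map (fun j => l.getD j 0) = l := by
  apply List.ext_getElem (by simp)
  intro j hj hj'
  simp only [List.getElem_map, List.getElem_range]
  rw [List.getD_eq_getElem l _ hj']

-- flattening constant-length pieces = indexing by divmod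
lemma flatMap_const (f : Int → List Int) (n : Nat) (hf : ∀ c, (f c).length = n)
    (L : List Int) :
    L.flatMap f
      = (List.range (L.length * n)).map (fun j => (f (L.getD (j / n) 0)).getD (j % n) 0) := by
  induction L with
  | nil => simp
  | cons c L ihl =>
    rcases Nat.eq_zero_or_pos n with hn | hn
    · subst hn
      have h1 : f c = [] := List.eq_nil_of_length_eq_zero (hf c)
      have h2 : L.flatMap f = [] := by rw [ihl]; simp
      simp [h1, h2]
    · have hlen : (c :: L).length * n = n + L.length * n := by
        simp only [List.length_cons]; ring
      rw [List.flatMap_cons, ihl, hlen, List.range_add, List.map_append, List.map_map]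
      congr 1
      · conv_lhs => rw [← self_eq_range_map (f c), hf c]
        apply List.map_congr_left
        intro j hj
        have hjn : j < n := List.mem_range.mp hj
        rw [Nat.div_eq_of_lt hjn, Nat.mod_eq_of_lt hjn]
        rfl
      · apply List.map_congr_left
        intro j hj
        show _ = (f ((c :: L).getD ((n + j) / n) 0)).getD ((n + j) % n) 0
        rw [Nat.add_comm n j, Nat.add_div_right _ hn, Nat.add_mod_right, List.getD_cons_succ]

lemma getD_map_take (comp : List (List Int)) (iw k : Nat) :
    ((comp.map (fun row => row.take iw)).getD k []) = (comp.getD k []).take iw := by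
  simp only [List.getD_eq_getElem?_getD, List.getElem?_map]
  cases comp[k]? <;> simp

lemma getD_take_lt (l : List Int) (n m : Nat) (h : m < n) :
    (l.take n).getD m 0 = l.getD m 0 := by
  simp [List.getD_eq_getElem?_getD, List.getElem?_take, h]

lemma getD_complement (inp : List (List Int)) (color : Int) (k : Nat) :
    (pvComplement inp color).getD k []
      = (inp.getD k []).map (fun v => if v ≠ 0 then 0 else color) := by
  unfold pvComplement
  simp only [List.getD_eq_getElem?_getD, List.getElem?_map]
  cases inp[k]? <;> simp

lemma portB_eq_grid (inp : List (List Int)) (color : Int)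
    (hpre : Pre_tile_self_complement_output_py inp color) :
    tile_self_complement_output_py_alt inp color
      = (List.range (inp.length * inp.length)).map (fun i =>
          (List.range (iwOf inp * iwOf inp)).map
            (fun j => gForm inp inp.length (iwOf inp) (gvOf inp color) i j)) := by
  unfold Pre_tile_self_complement_output_py at hpre
  show (List.range (inp.length * inp.length)).map (fun i =>
      ((inp.getD (i / inp.length) []).take (iwOf inp)).flatMap (fun c =>
        if c ≠ 0
        then ((pvComplement inp color).map (fun row => row.take (iwOf inp))).getD
          (i % inp.length) []
        else List.replicate (iwOf inp) (0 : Int))) = _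
  apply List.map_congr_left
  intro i hi
  have hi' : i < inp.length * inp.length := List.mem_range.mp hi
  have hih : 0 < inp.length := by
    rcases Nat.eq_zero_or_pos inp.length with h | h
    · rw [h] at hi'; simp at hi'
    · exact h
  have hr : i / inp.length < inp.length := (Nat.div_lt_iff_lt_mul hih).mpr hi'
  have hbr : i % inp.length < inp.length := Nat.mod_lt _ hih
  have hrowlen : ∀ r, r < inp.length → iwOf inp ≤ (inp.getD r []).length := by
    intro r hrlt
    rw [List.getD_eq_getElem _ _ hrlt]
    have := hpre (inp[r]) (List.getElem_mem hrlt)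
    unfold iwOf
    rw [if_pos hih]
    exact this
  have hcomplen : iwOf inp ≤ ((pvComplement inp color).getD (i % inp.length) []).length := by
    rw [getD_complement, List.length_map]
    exact hrowlen _ hbr
  rw [getD_map_take]
  rw [flatMap_const
    (fun c => if c ≠ 0
      then ((pvComplement inp color).getD (i % inp.length) []).take (iwOf inp)
      else List.replicate (iwOf inp) (0 : Int))
    (iwOf inp)
    (fun c => by
      show (if c ≠ 0
        then ((pvComplement inp color).getD (i % inp.length) []).take (iwOf inp)
        else List.replicate (iwOf inp) (0 : Int)).length = iwOf inp
      by_cases hc0 : c ≠ 0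
      · rw [if_pos hc0]; simp only [List.length_take]; omega
      · rw [if_neg hc0]; simp)
    ((inp.getD (i / inp.length) []).take (iwOf inp))]
  have hLlen : ((inp.getD (i / inp.length) []).take (iwOf inp)).length = iwOf inp := by
    simp only [List.length_take]
    have := hrowlen _ hr
    omega
  rw [hLlen]
  apply List.map_congr_left
  intro j hj
  have hj' : j < iwOf inp * iwOf inp := List.mem_range.mp hj
  have hiw0 : 0 < iwOf inp := by
    rcases Nat.eq_zero_or_pos (iwOf inp) with h | h
    · rw [h] at hj'; simp at hj'
    · exact h
  have hjr : j / iwOf inp < iwOf inp := (Nat.div_lt_iff_lt_mul hiw0).mpr hj'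
  have hjm : j % iwOf inp < iwOf inp := Nat.mod_lt _ hiw0
  rw [getD_take_lt _ _ _ hjr]
  unfold gForm gvOf
  by_cases hc : (inp.getD (i / inp.length) []).getD (j / iwOf inp) 0 ≠ 0
  · rw [if_pos hc, if_pos hc, getD_take_lt _ _ _ hjm]
  · rw [if_neg hc, if_neg hc]
    simp [List.getD_eq_getElem?_getD, List.getElem?_replicate, hjm]

-- row lengths and cells of a grid built by nested map-over-range
lemma rowlen_grid (N M : Nat) (f : Nat → Nat → Int) (k : Nat) :
    (((List.range N).map (fun i => (List.range M).map (f i))).getD k []).length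
      = if k < N then M else 0 := by
  by_cases h : k < N
  · simp [List.getD_eq_getElem?_getD, List.getElem?_map, List.getElem?_range, h]
  · rw [List.getD_eq_default _ _ (by simpa using (by omega : N ≤ k))]
    simp [h]

lemma gCell_grid (N M : Nat) (f : Nat → Nat → Int) (k l : Nat) :
    gCell ((List.range N).map (fun i => (List.range M).map (f i))) k l
      = if k < N ∧ l < M then f k l else 0 := by
  unfold gCell
  by_cases hk : k < N
  · have : ((List.range N).map (fun i => (List.range M).map (f i))).getD k []
        = (List.range M).map (f k) := by
      simp [List.getD_eq_getElem?_getD, List.getElem?_map, List.getElem?_range, hk]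
    rw [this]
    by_cases hl : l < M
    · simp [List.getD_eq_getElem?_getD, List.getElem?_map, List.getElem?_range, hk, hl]
    · rw [List.getD_eq_default ((List.range M).map (f k)) 0 (by simpa using (by omega : M ≤ l)),
        if_neg (by omega)]
  · rw [List.getD_eq_default ((List.range N).map (fun i => (List.range M).map (f i))) []
        (by simpa using (by omega : N ≤ k)), if_neg (by omega)]
    rfl

lemma rowlen_zeros (N M k : Nat) :
    (((List.range N).map (fun _ => List.replicate M (0 : Int))).getD k []).length
      = if k < N then M else 0 := by
  by_cases h : k < N
  · simp [List.getD_eq_getElem?_getD, List.getElem?_map, List.getElem?_range, h]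
  · rw [List.getD_eq_default _ _ (by simpa using (by omega : N ≤ k))]
    simp [h]

lemma gCell_zeros (N M k l : Nat) :
    gCell ((List.range N).map (fun _ => List.replicate M (0 : Int))) k l = 0 := by
  unfold gCell
  by_cases h : k < N
  · have : ((List.range N).map (fun _ => List.replicate M (0 : Int))).getD k []
        = List.replicate M (0 : Int) := by
      simp [List.getD_eq_getElem?_getD, List.getElem?_map, List.getElem?_range, h]
    rw [this]
    by_cases hl : l < M
    · simp [List.getD_eq_getElem?_getD, List.getElem?_replicate, hl]
    · rw [List.getD_eq_default (List.replicate M (0 : Int)) 0 (by simpa using (by omega : M ≤ l))]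
  · rw [List.getD_eq_default ((List.range N).map (fun _ => List.replicate M (0 : Int))) []
        (by simpa using (by omega : N ≤ k))]
    rfl

-- two grids with the same shape and the same cells are equal
lemma grid_ext (X Y : List (List Int)) (h1 : X.length = Y.length)
    (h2 : ∀ k, (X.getD k []).length = (Y.getD k []).length)
    (h3 : ∀ k l, gCell X k l = gCell Y k l) : X = Y := by
  apply List.ext_getElem h1
  intro k hk hk'
  apply List.ext_getElem
  · have := h2 k
    rwa [List.getD_eq_getElem X _ hk, List.getD_eq_getElem Y _ hk'] at this
  · intro l hl hl'
    have := h3 k l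
    unfold gCell at this
    rwa [List.getD_eq_getElem X _ hk, List.getD_eq_getElem Y _ hk',
      List.getD_eq_getElem _ _ hl, List.getD_eq_getElem _ _ hl'] at this

-- ===== VERDICT (by name: the statement is the Claim_ definition above) =====
theorem tile_self_complement_output_py_spec : Claim_equal_tile_self_complement_output_py := by
  intro inp color _ hpre
  unfold Spec_tile_self_complement_output_py
  rw [portA_eq_rLoop, portB_eq_grid inp color hpre]
  have hchar := gCell_rLoop
    ((List.range (inp.length * inp.length)).map
      (fun _ => List.replicate (iwOf inp * iwOf inp) (0 : Int)))
    inp inp.length (iwOf inp) (gvOf inp color) inp.length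
    (by simp)
    (fun k' => rowlen_zeros (inp.length * inp.length) (iwOf inp * iwOf inp) k')
    (fun k' l' => gCell_zeros (inp.length * inp.length) (iwOf inp * iwOf inp) k' l')
    (le_refl inp.length)
  apply grid_ext
  · rw [length_rLoop]; simp
  · intro k
    rw [rowlen_rLoop, rowlen_zeros, rowlen_grid]
  · intro k l
    rw [hchar k l, gCell_grid]
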